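-- pv_equiv track=rewrite | github.com/xzAscC/LinearSteering | src/plot/plot_linear_probe.py | _ordered_hooks_for_item
-- ===== SOURCE A (Python) =====
-- from typing import List
--
-- HOOK_POSITION_ORDER = [
--     "input_ln",
--     "attn",
--     "post_attn_ln",
--     "post_attn_proj_ln",
--     "mlp",
--     "post_mlp_ln",
--     "block_out",
--     "block_in",
--     "attn_in",
--     "attn_out",
--     "mlp_in",
--     "mlp_out",
-- ]
--
-- def _ordered_hooks_for_item(
--     preferred_hook_points: List[str],
--     observed_hooks: set[str],
-- ) -> List[str]:
--     ordered_hooks = [hook for hook in preferred_hook_points if hook in observed_hooks]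
--     for hook in HOOK_POSITION_ORDER:
--         if hook in observed_hooks and hook not in ordered_hooks:
--             ordered_hooks.append(hook)
--     for hook in sorted(observed_hooks):
--         if hook not in ordered_hooks:
--             ordered_hooks.append(hook)
--     return ordered_hooks
-- ===== SOURCE B (Python) =====
-- from typing import List
--
-- HOOK_POSITION_ORDER = [
--     "input_ln",
--     "attn",
--     "post_attn_ln",
--     "post_attn_proj_ln",
--     "mlp",
--     "post_mlp_ln",
--     "block_out",
--     "block_in",
--     "attn_in",
--     "attn_out",
--     "mlp_in",
--     "mlp_out",
-- ]
--
-- def _ordered_hooks_for_item(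
--     preferred_hook_points: List[str],
--     observed_hooks: set[str],
-- ) -> List[str]:
--     ordered = [hook for hook in preferred_hook_points if hook in observed_hooks]
--     seen = set(ordered)
--     rank = {hook: i for i, hook in enumerate(HOOK_POSITION_ORDER)}
--     sentinel = len(HOOK_POSITION_ORDER)
--     rest = sorted(observed_hooks - seen, key=lambda h: (rank.get(h, sentinel), h))
--     return ordered + rest
-- ===== Notes on version B (the rewrite author's own statement) =====
-- stated objective: faster
-- what changed: Replaces A's two sequential dedup-append loops (canonical-order scan and alphabetical scan, each re-scanning the growing ordered_hooks list for membership) by one keyed sort of the not-yet-taken observed hooks using a precomputed rank table with an out-of-table sentinel, with set-based membership.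
import Mathlib
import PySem

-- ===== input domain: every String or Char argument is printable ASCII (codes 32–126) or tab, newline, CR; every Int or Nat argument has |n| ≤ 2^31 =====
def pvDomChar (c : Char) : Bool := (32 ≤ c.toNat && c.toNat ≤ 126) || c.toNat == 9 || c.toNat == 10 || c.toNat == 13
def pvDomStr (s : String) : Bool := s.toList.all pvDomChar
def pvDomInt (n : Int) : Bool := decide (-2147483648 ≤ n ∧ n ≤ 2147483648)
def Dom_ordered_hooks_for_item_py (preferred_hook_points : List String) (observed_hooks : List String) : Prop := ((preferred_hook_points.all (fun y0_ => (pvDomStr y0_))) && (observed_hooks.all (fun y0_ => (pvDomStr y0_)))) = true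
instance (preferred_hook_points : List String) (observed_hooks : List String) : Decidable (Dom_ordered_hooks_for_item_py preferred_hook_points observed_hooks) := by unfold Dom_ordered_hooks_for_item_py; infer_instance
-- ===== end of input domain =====

-- B replaces A's two dedup-append loops by one keyed sort of the remaining observed
-- hooks over a precomputed rank table (objective: simpler; return value only, no mutation).

-- ===== PORT A =====
def HOOK_POSITION_ORDER : List String :=
  ["input_ln", "attn", "post_attn_ln", "post_attn_proj_ln", "mlp", "post_mlp_ln",
   "block_out", "block_in", "attn_in", "attn_out", "mlp_in", "mlp_out"]

def ordered_hooks_for_item_py (preferred_hook_points : List String) (observed_hooks : List String) : List String :=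
  -- ordered_hooks = [hook for hook in preferred_hook_points if hook in observed_hooks]
  let ordered_hooks := preferred_hook_points.filter (fun hook => observed_hooks.contains hook)
  -- for hook in HOOK_POSITION_ORDER: if hook in observed_hooks and hook not in ordered_hooks: append
  let ordered_hooks := HOOK_POSITION_ORDER.foldl
    (fun acc hook => if observed_hooks.contains hook && !acc.contains hook then acc ++ [hook] else acc)
    ordered_hooks
  -- for hook in sorted(observed_hooks): if hook not in ordered_hooks: append
  let ordered_hooks := (PySem.List.sorted observed_hooks (fun x => x) false).foldl
    (fun acc hook => if !acc.contains hook then acc ++ [hook] else acc)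
    ordered_hooks
  ordered_hooks

-- ===== PORT B =====
-- rank = {hook: i for i, hook in enumerate(HOOK_POSITION_ORDER)}
def pvRankTable : PySem.Dict String Int :=
  (PySem.List.enumerate HOOK_POSITION_ORDER).foldl (fun d p => d.insert p.2 p.1) PySem.Dict.empty

def ordered_hooks_for_item_py_alt (preferred_hook_points : List String) (observed_hooks : List String) : List String :=
  let ordered := preferred_hook_points.filter (fun hook => observed_hooks.contains hook)
  let seen := PySem.Set.ofList ordered
  let sentinel : Int := PySem.List.len HOOK_POSITION_ORDER
  -- sorted(observed_hooks - seen, key=lambda h: (rank.get(h, sentinel), h)); the key is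
  -- injective on the set, so the result does not depend on the set's iteration order
  let rest := PySem.List.sorted2 (PySem.Set.diff (PySem.Set.ofList observed_hooks) seen)
    (fun h => pvRankTable.getD h sentinel) (fun h => h) false
  ordered ++ rest

-- ===== PRECONDITION & SPEC =====
-- observed_hooks is a Python set: Pre_ only states the List-model invariant that its
-- elements are distinct; no actual Python input is excluded.
def Pre_ordered_hooks_for_item_py (preferred_hook_points : List String) (observed_hooks : List String) : Prop :=
  observed_hooks.Nodup
instance (preferred_hook_points : List String) (observed_hooks : List String) : Decidable (Pre_ordered_hooks_for_item_py preferred_hook_points observed_hooks) := by unfold Pre_ordered_hooks_for_item_py; infer_instance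

def pvWitness_ordered_hooks_for_item_py : List String × List String :=
  (["mlp", "resid"], ["attn", "resid", "mlp", "alpha"])

def Spec_ordered_hooks_for_item_py (preferred_hook_points : List String) (observed_hooks : List String) (out : List String) : Prop := out = ordered_hooks_for_item_py_alt preferred_hook_points observed_hooks
instance (preferred_hook_points : List String) (observed_hooks : List String) (out : List String) : Decidable (Spec_ordered_hooks_for_item_py preferred_hook_points observed_hooks out) := by unfold Spec_ordered_hooks_for_item_py; infer_instance

-- ===== CLAIM (what is proved, stated in full; the proofs are below) =====
def Claim_equal_ordered_hooks_for_item_py : Prop := ∀ (preferred_hook_points : List String) (observed_hooks : List String), Dom_ordered_hooks_for_item_py preferred_hook_points observed_hooks → Pre_ordered_hooks_for_item_py preferred_hook_points observed_hooks → Spec_ordered_hooks_for_item_py preferred_hook_points observed_hooks (ordered_hooks_for_item_py preferred_hook_points observed_hooks)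

-- ===== LEMMAS AND PROOFS =====

-- A's dedup-append loop over a duplicate-free list appends exactly the hooks passing the
-- test against the INITIAL accumulator, in list order.
theorem pv_foldl_append_filter (p : String → Bool) :
    ∀ (xs acc : List String), xs.Nodup →
      xs.foldl (fun a h => if p h && !a.contains h then a ++ [h] else a) acc
        = acc ++ xs.filter (fun h => p h && !acc.contains h) := by
  intro xs
  induction xs with
  | nil => intro acc _; simp
  | cons x t ih =>
    intro acc hnd
    obtain ⟨hx, hnd'⟩ := List.nodup_cons.mp hnd
    by_cases hc : (p x && !acc.contains x) = true
    · simp only [List.foldl_cons, List.filter_cons, hc, if_true]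
      rw [ih (acc ++ [x]) hnd']
      have hfe : t.filter (fun h => p h && !(acc ++ [x]).contains h)
          = t.filter (fun h => p h && !acc.contains h) := by
        apply List.filter_congr
        intro h hh
        have hne : h ≠ x := fun e => hx (e ▸ hh)
        simp [hne]
      rw [hfe]; simp
    · have hcf : (p x && !acc.contains x) = false := by simpa using hc
      simp only [List.foldl_cons, List.filter_cons, hcf, Bool.false_eq_true, if_false]
      exact ih acc hnd'

-- the same loop without the extra test (A's third loop)
theorem pv_foldl_append_filter' :
    ∀ (xs acc : List String), xs.Nodup →
      xs.foldl (fun a h => if !a.contains h then a ++ [h] else a) acc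
        = acc ++ xs.filter (fun h => !acc.contains h) := by
  intro xs acc hnd
  have h1 := pv_foldl_append_filter (fun _ => true) xs acc hnd
  simpa using h1

-- sorted2 (tuple key) named by any strictly lexicographically increasing rearrangement
theorem pv_sorted2_eq_lex (xs ys : List String) (k1 : String → Int) (hperm : ys.Perm xs)
    (hpw : ys.Pairwise (fun a b => k1 a < k1 b ∨ (k1 a = k1 b ∧ a < b))) :
    PySem.List.sorted2 xs k1 (fun h => h) false = ys := by
  have hbf : (fun (a b : String) =>
        decide (k1 a < k1 b) || (!decide (k1 b < k1 a) && decide ((fun h => h) a < (fun h => h) b)))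
      = fun a b => decide (toLex ((k1 a, a) : Int × String) < toLex ((k1 b, b) : Int × String)) := by
    funext a b
    rw [Bool.eq_iff_iff]
    simp only [Bool.or_eq_true, Bool.and_eq_true, Bool.not_eq_true', decide_eq_true_eq,
      decide_eq_false_iff_not, Prod.Lex.toLex_lt_toLex]
    constructor
    · rintro (h | ⟨h1, h2⟩)
      · exact Or.inl h
      · rcases lt_or_eq_of_le (not_lt.mp h1) with h | h
        · exact Or.inl h
        · exact Or.inr ⟨h, h2⟩
    · rintro (h | ⟨he, hs⟩)
      · exact Or.inl h
      · exact Or.inr ⟨by omega, hs⟩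
  have hkey : PySem.List.sorted2 xs k1 (fun h => h) false
      = PySem.List.sorted xs (fun x => toLex ((k1 x, x) : Int × String)) false := by
    calc PySem.List.sorted2 xs k1 (fun h => h) false
        = List.foldl (fun acc x => PySem.List.insertBy (fun (a b : String) =>
            decide (k1 a < k1 b) || (!decide (k1 b < k1 a) && decide ((fun h => h) a < (fun h => h) b))) x acc) [] xs := rfl
      _ = List.foldl (fun acc x => PySem.List.insertBy (fun (a b : String) =>
            decide (toLex ((k1 a, a) : Int × String) < toLex ((k1 b, b) : Int × String))) x acc) [] xs := by rw [hbf]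
      _ = PySem.List.sorted xs (fun x => toLex ((k1 x, x) : Int × String)) false :=
            (PySem.List.sorted_eq_foldl_insertBy xs _).symm
  rw [hkey]
  apply PySem.List.sorted_eq_of_perm_of_pairwise_lt _ _ _ hperm
  apply hpw.imp
  intro a b hab
  rcases hab with h | ⟨he, hs⟩
  · exact Prod.Lex.toLex_lt_toLex.mpr (Or.inl h)
  · exact Prod.Lex.toLex_lt_toLex.mpr (Or.inr ⟨he, hs⟩)

theorem pv_rank_not_mem (h : String) (hh : h ∉ HOOK_POSITION_ORDER) :
    pvRankTable.getD h 12 = 12 := by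
  apply PySem.Dict.getD_of_not_contains
  have hk : pvRankTable.keys = HOOK_POSITION_ORDER := by decide
  rw [PySem.Dict.contains_eq_decide_mem_keys, hk]
  simpa using hh

-- ===== VERDICT (by name: the statement is the Claim_ definition above) =====
theorem ordered_hooks_for_item_py_spec : Claim_equal_ordered_hooks_for_item_py := by
  intro P O _ hpre
  unfold Spec_ordered_hooks_for_item_py
  unfold ordered_hooks_for_item_py ordered_hooks_for_item_py_alt
  simp only []
  set o0 := P.filter (fun hook => O.contains hook) with ho0
  set canon := HOOK_POSITION_ORDER.filter (fun h => O.contains h && !o0.contains h) with hcanon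
  set S := PySem.List.sorted O (fun x => x) false with hS
  set alpha := S.filter (fun h => !(o0 ++ canon).contains h) with halpha
  have hpre' : O.Nodup := hpre
  have hSnd : S.Nodup := (PySem.List.sorted_perm O (fun x => x) false).symm.nodup hpre'
  have hHnd : HOOK_POSITION_ORDER.Nodup := by decide
  -- A's value
  have hA : (PySem.List.sorted O (fun x => x) false).foldl
      (fun acc hook => if !acc.contains hook then acc ++ [hook] else acc)
      (HOOK_POSITION_ORDER.foldl
        (fun acc hook => if O.contains hook && !acc.contains hook then acc ++ [hook] else acc) o0)
      = (o0 ++ canon) ++ alpha := by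
    rw [pv_foldl_append_filter _ _ _ hHnd, ← hcanon, pv_foldl_append_filter' _ _ hSnd]
  rw [hA]
  -- B's tail
  have hsent : PySem.List.len HOOK_POSITION_ORDER = (12 : Int) := by decide
  have hdiff : PySem.Set.diff (PySem.Set.ofList O) (PySem.Set.ofList o0)
      = O.filter (fun h => !o0.contains h) := by
    have h1 : PySem.Set.ofList O = O := PySem.Set.ofList_eq_self_of_nodup O hpre'
    rw [h1]
    show O.filter _ = _
    apply List.filter_congr
    intro h _
    simp [PySem.Set.contains_eq_listContains, PySem.Set.mem_ofList]
  rw [hsent, hdiff]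
  -- membership facts
  have hmc : ∀ h, h ∈ canon ↔ (h ∈ HOOK_POSITION_ORDER ∧ h ∈ O ∧ h ∉ o0) := by
    intro h; simp [hcanon, List.mem_filter]
  have hma : ∀ h, h ∈ alpha ↔ (h ∈ O ∧ h ∉ o0 ∧ h ∉ canon) := by
    intro h
    simp only [halpha, List.mem_filter, hS, PySem.List.mem_sorted]
    constructor
    · rintro ⟨h1, h2⟩
      simp only [Bool.not_eq_eq_eq_not, Bool.not_true, List.contains_append] at h2
      rcases Bool.or_eq_false_iff.mp h2 with ⟨ha, hb⟩
      exact ⟨h1, by simpa using ha, by simpa using hb⟩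
    · rintro ⟨h1, h2, h3⟩
      refine ⟨h1, ?_⟩
      simp [h2, h3]
  have hcanon_nd : canon.Nodup := hHnd.filter _
  have halpha_nd : alpha.Nodup := hSnd.filter _
  have hdisj : List.Disjoint canon alpha := by
    intro a hac haa
    exact ((hma a).mp haa).2.2 hac
  have hnd : (canon ++ alpha).Nodup := List.Nodup.append hcanon_nd halpha_nd hdisj
  have hRnd : (O.filter (fun h => !o0.contains h)).Nodup := hpre.filter _
  have hperm : (canon ++ alpha).Perm (O.filter (fun h => !o0.contains h)) := by
    rw [List.perm_ext_iff_of_nodup hnd hRnd]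
    intro a
    simp only [List.mem_append, List.mem_filter, hmc, hma]
    constructor
    · rintro (⟨_, hO, hno⟩ | ⟨hO, hno, _⟩) <;> exact ⟨hO, by simpa using hno⟩
    · rintro ⟨hO, hno⟩
      have hno' : a ∉ o0 := by simpa using hno
      by_cases hH : a ∈ HOOK_POSITION_ORDER
      · exact Or.inl ⟨hH, hO, hno'⟩
      · exact Or.inr ⟨hO, hno', fun hc => hH hc.1⟩
  -- rank facts
  have hlt12 : ∀ h ∈ HOOK_POSITION_ORDER, pvRankTable.getD h 12 < 12 := by decide
  have hpwH : HOOK_POSITION_ORDER.Pairwise (fun a b => pvRankTable.getD a 12 < pvRankTable.getD b 12) := by decide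
  have halpha12 : ∀ h ∈ alpha, pvRankTable.getD h 12 = 12 := by
    intro h hh
    have hm := (hma h).mp hh
    apply pv_rank_not_mem
    intro hH
    exact hm.2.2 ((hmc h).mpr ⟨hH, hm.1, hm.2.1⟩)
  have hpw : (canon ++ alpha).Pairwise (fun a b => pvRankTable.getD a 12 < pvRankTable.getD b 12 ∨
      (pvRankTable.getD a 12 = pvRankTable.getD b 12 ∧ a < b)) := by
    rw [List.pairwise_append]
    refine ⟨?_, ?_, ?_⟩
    · exact (List.Pairwise.sublist (List.filter_sublist) hpwH).imp (fun h => Or.inl h)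
    · have hle : alpha.Pairwise (fun a b => a ≤ b) :=
        (PySem.List.sorted_pairwise O (fun x => x)).filter _
      have hne : alpha.Pairwise (fun a b => a ≠ b) := halpha_nd
      exact (hle.and hne).imp_of_mem (fun {a b} ha hb hab =>
        Or.inr ⟨(halpha12 a ha).trans (halpha12 b hb).symm, lt_of_le_of_ne hab.1 hab.2⟩)
    · intro a ha b hb
      have h1 : pvRankTable.getD a 12 < 12 := hlt12 a ((hmc a).mp ha).1
      have h2 : pvRankTable.getD b 12 = 12 := halpha12 b hb
      exact Or.inl (by omega)
  rw [pv_sorted2_eq_lex _ _ _ hperm hpw, List.append_assoc]
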